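-- pv_equiv track=rewrite | github.com/ashique6465/DSA | Accenture/ProductSmall.py | ProductSmallestPair
-- ===== SOURCE A (Python) =====
-- def ProductSmallestPair(sum,arr):
--     n = len(arr)
--     if n == 0 or n < 2:
--         return -1
--     arr.sort()
--
--     for i in range(n-1):
--         for j in range(i+1,n):
--             if arr[i] + arr[j] <= sum:
--                 return arr[i] * arr[j]
--
--     return 0
-- ===== SOURCE B (Python) =====
-- def ProductSmallestPair(sum, arr):
--     if len(arr) < 2:
--         return -1
--     a, b = arr[0], arr[1]
--     if b < a:
--         a, b = b, a
--     for x in arr[2:]: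
--         if x < a:
--             a, b = x, a
--         elif x < b:
--             b = x
--     return a * b if a + b <= sum else 0
-- ===== Notes on version B (the rewrite author's own statement) =====
-- stated objective: alternative
-- what changed: B replaces A's in-place sort plus nested pair scan by a single pass that tracks the two smallest elements and checks their sum once (B also leaves arr unmutated, while A sorts it in place).
import Mathlib
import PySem

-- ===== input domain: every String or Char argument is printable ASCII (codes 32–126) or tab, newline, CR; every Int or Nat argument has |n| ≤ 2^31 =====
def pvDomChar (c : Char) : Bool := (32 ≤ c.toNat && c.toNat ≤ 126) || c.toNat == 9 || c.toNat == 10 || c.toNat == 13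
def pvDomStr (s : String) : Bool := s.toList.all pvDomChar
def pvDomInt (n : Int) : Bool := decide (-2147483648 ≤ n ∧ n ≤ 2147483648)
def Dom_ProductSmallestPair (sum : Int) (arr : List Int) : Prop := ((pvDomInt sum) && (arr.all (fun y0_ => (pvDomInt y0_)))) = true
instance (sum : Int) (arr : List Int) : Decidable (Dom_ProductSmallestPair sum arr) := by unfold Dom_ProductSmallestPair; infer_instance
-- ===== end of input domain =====

-- B finds the two smallest elements in a single pass instead of sorting and scanning pairs;
-- return-value equivalence only: A sorts arr in place, B does not mutate it.

-- ===== PORT A =====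
-- inner loop: for j in range(i+1, n): if arr[i] + arr[j] <= sum: return arr[i]*arr[j]
def pvLoopJ (sum : Int) (s : List Int) (i : Int) (js : List Int) : Option Int :=
  match js with
  | [] => none
  | j :: rest =>
    if PySem.List.pyGetD s i 0 + PySem.List.pyGetD s j 0 ≤ sum then
      some (PySem.List.pyGetD s i 0 * PySem.List.pyGetD s j 0)
    else pvLoopJ sum s i rest

-- outer loop: for i in range(n-1): …
def pvLoopI (sum : Int) (s : List Int) (n : Int) (is_ : List Int) : Option Int :=
  match is_ with
  | [] => none
  | i :: rest =>
    match pvLoopJ sum s i (PySem.List.pyRange (i + 1) n 1) with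
    | some v => some v
    | none => pvLoopI sum s n rest

def ProductSmallestPair (sum : Int) (arr : List Int) : Int :=
  let n : Int := arr.length
  if n == 0 || n < 2 then -1
  else
    let s := PySem.List.sorted arr (fun x => x) false
    match pvLoopI sum s n (PySem.List.pyRange 0 (n - 1) 1) with
    | some v => v
    | none => 0

-- ===== PORT B =====
-- one pass over arr[2:] maintaining the two smallest values a ≤ b seen so far
def pvScan (a b : Int) (l : List Int) : Int × Int :=
  match l with
  | [] => (a, b)
  | x :: rest =>
    if x < a then pvScan x a rest
    else if x < b then pvScan a x rest
    else pvScan a b rest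

def ProductSmallestPair_alt (sum : Int) (arr : List Int) : Int :=
  match arr with
  | x0 :: x1 :: rest =>
    let p := if x1 < x0 then (x1, x0) else (x0, x1)
    let q := pvScan p.1 p.2 rest
    if q.1 + q.2 ≤ sum then q.1 * q.2 else 0
  | _ => -1

-- ===== PRECONDITION & SPEC =====
def Spec_ProductSmallestPair (sum : Int) (arr : List Int) (out : Int) : Prop := out = ProductSmallestPair_alt sum arr
instance (sum : Int) (arr : List Int) (out : Int) : Decidable (Spec_ProductSmallestPair sum arr out) := by unfold Spec_ProductSmallestPair; infer_instance

-- ===== CLAIM (what is proved, stated in full; the proofs are below) =====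
def Claim_equal_ProductSmallestPair : Prop := ∀ (sum : Int) (arr : List Int), Dom_ProductSmallestPair sum arr → Spec_ProductSmallestPair sum arr (ProductSmallestPair sum arr)

-- ===== LEMMAS AND PROOFS =====

-- invariant of B's scan: given a ≤ b, the result (p, q) has p ≤ q ≤ b, is a
-- sub-multiset of a :: b :: l with the leftovers t all ≥ q
theorem pvScan_inv (l : List Int) : ∀ (a b : Int), a ≤ b →
    (pvScan a b l).1 ≤ (pvScan a b l).2 ∧ (pvScan a b l).2 ≤ b ∧
    ∃ t : List Int, ((pvScan a b l).1 :: (pvScan a b l).2 :: t).Perm (a :: b :: l) ∧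
      ∀ y ∈ t, (pvScan a b l).2 ≤ y := by
  induction l with
  | nil =>
    intro a b hab
    exact ⟨hab, le_refl b, [], List.Perm.refl _, by simp⟩
  | cons x rest ih =>
    intro a b hab
    by_cases h1 : x < a
    · have ih' := ih x a (le_of_lt h1)
      obtain ⟨hpq, hqb, t, hperm, ht⟩ := ih'
      simp only [pvScan, if_pos h1]
      refine ⟨hpq, le_trans hqb hab, b :: t, ?_, ?_⟩
      · rw [← Multiset.coe_eq_coe] at hperm ⊢
        simp only [← Multiset.cons_coe] at hperm ⊢
        calc ((pvScan x a rest).1 ::ₘ (pvScan x a rest).2 ::ₘ b ::ₘ (t : Multiset Int))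
            = b ::ₘ ((pvScan x a rest).1 ::ₘ (pvScan x a rest).2 ::ₘ (t : Multiset Int)) := by
              rw [Multiset.cons_swap (pvScan x a rest).2 b,
                  Multiset.cons_swap (pvScan x a rest).1 b]
          _ = b ::ₘ x ::ₘ a ::ₘ (rest : Multiset Int) := by rw [hperm]
          _ = a ::ₘ b ::ₘ x ::ₘ (rest : Multiset Int) := by
              rw [Multiset.cons_swap x a, Multiset.cons_swap b a]
      · intro y hy
        rcases List.mem_cons.mp hy with h | h
        · exact h ▸ le_trans hqb hab
        · exact ht y h
    · rw [not_lt] at h1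
      by_cases h2 : x < b
      · have ih' := ih a x h1
        obtain ⟨hpq, hqx, t, hperm, ht⟩ := ih'
        simp only [pvScan, if_neg (not_lt.mpr h1), if_pos h2]
        refine ⟨hpq, le_trans hqx (le_of_lt h2), b :: t, ?_, ?_⟩
        · rw [← Multiset.coe_eq_coe] at hperm ⊢
          simp only [← Multiset.cons_coe] at hperm ⊢
          calc ((pvScan a x rest).1 ::ₘ (pvScan a x rest).2 ::ₘ b ::ₘ (t : Multiset Int))
              = b ::ₘ ((pvScan a x rest).1 ::ₘ (pvScan a x rest).2 ::ₘ (t : Multiset Int)) := by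
                rw [Multiset.cons_swap (pvScan a x rest).2 b,
                    Multiset.cons_swap (pvScan a x rest).1 b]
            _ = b ::ₘ a ::ₘ x ::ₘ (rest : Multiset Int) := by rw [hperm]
            _ = a ::ₘ b ::ₘ x ::ₘ (rest : Multiset Int) := by rw [Multiset.cons_swap b a]
        · intro y hy
          rcases List.mem_cons.mp hy with h | h
          · exact h ▸ le_trans hqx (le_of_lt h2)
          · exact ht y h
      · rw [not_lt] at h2
        have ih' := ih a b hab
        obtain ⟨hpq, hqb, t, hperm, ht⟩ := ih'
        simp only [pvScan, if_neg (not_lt.mpr h1), if_neg (not_lt.mpr h2)]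
        refine ⟨hpq, hqb, x :: t, ?_, ?_⟩
        · rw [← Multiset.coe_eq_coe] at hperm ⊢
          simp only [← Multiset.cons_coe] at hperm ⊢
          calc ((pvScan a b rest).1 ::ₘ (pvScan a b rest).2 ::ₘ x ::ₘ (t : Multiset Int))
              = x ::ₘ ((pvScan a b rest).1 ::ₘ (pvScan a b rest).2 ::ₘ (t : Multiset Int)) := by
                rw [Multiset.cons_swap (pvScan a b rest).2 x,
                    Multiset.cons_swap (pvScan a b rest).1 x]
            _ = x ::ₘ a ::ₘ b ::ₘ (rest : Multiset Int) := by rw [hperm]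
            _ = a ::ₘ b ::ₘ x ::ₘ (rest : Multiset Int) := by
                rw [Multiset.cons_swap x a, Multiset.cons_swap x b]
        · intro y hy
          rcases List.mem_cons.mp hy with h | h
          · exact h ▸ le_trans hqb h2
          · exact ht y h

-- the sorted list starts with B's pair
theorem sorted_eq_scan (x0 x1 : Int) (rest : List Int) :
    ∃ u : List Int,
      PySem.List.sorted (x0 :: x1 :: rest) (fun x => x) false =
        (pvScan (if x1 < x0 then (x1, x0) else (x0, x1)).1
                (if x1 < x0 then (x1, x0) else (x0, x1)).2 rest).1 ::
        (pvScan (if x1 < x0 then (x1, x0) else (x0, x1)).1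
                (if x1 < x0 then (x1, x0) else (x0, x1)).2 rest).2 :: u := by
  set a := (if x1 < x0 then (x1, x0) else (x0, x1)).1 with ha
  set b := (if x1 < x0 then (x1, x0) else (x0, x1)).2 with hb
  have hab : a ≤ b := by
    rw [ha, hb]; by_cases h : x1 < x0 <;> simp [h] <;> omega
  obtain ⟨hpq, hqb, t, hperm, ht⟩ := pvScan_inv rest a b hab
  refine ⟨PySem.List.sorted t (fun x => x) false, ?_⟩
  apply PySem.List.sorted_id_eq_of_perm_of_pairwise
  · -- permutation with arr
    have h1 : (PySem.List.sorted t (fun x => x) false).Perm t := PySem.List.sorted_perm t _ _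
    have h2 : (a :: b :: rest).Perm (x0 :: x1 :: rest) := by
      rw [ha, hb]; by_cases h : x1 < x0 <;> simp [h]
      exact List.Perm.swap x0 x1 rest
    exact ((List.Perm.cons _ (List.Perm.cons _ h1)).trans hperm).trans h2
  · -- pairwise ≤
    have hst : (PySem.List.sorted t (fun x => x) false).Pairwise (fun p q => p ≤ q) := by
      simpa using PySem.List.sorted_pairwise t (fun x => x)
    have hmem : ∀ y ∈ PySem.List.sorted t (fun x => x) false, (pvScan a b rest).2 ≤ y := by
      intro y hy
      exact ht y ((PySem.List.mem_sorted t _ _ y).mp hy)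
    refine List.pairwise_cons.mpr ⟨?_, List.pairwise_cons.mpr ⟨hmem, hst⟩⟩
    intro y hy
    rcases List.mem_cons.mp hy with h | h
    · exact h ▸ hpq
    · exact le_trans hpq (hmem y h)

theorem pvLoopJ_none (sum : Int) (s : List Int) (i : Int) (js : List Int)
    (h : ∀ j ∈ js, ¬ (PySem.List.pyGetD s i 0 + PySem.List.pyGetD s j 0 ≤ sum)) :
    pvLoopJ sum s i js = none := by
  induction js with
  | nil => rfl
  | cons j rest ih =>
    simp only [pvLoopJ, if_neg (h j (List.mem_cons_self))]
    exact ih (fun j' hj' => h j' (List.mem_cons_of_mem _ hj'))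

theorem pvLoopI_none (sum : Int) (s : List Int) (n : Int) (is_ : List Int)
    (h : ∀ i ∈ is_, pvLoopJ sum s i (PySem.List.pyRange (i + 1) n 1) = none) :
    pvLoopI sum s n is_ = none := by
  induction is_ with
  | nil => rfl
  | cons i rest ih =>
    simp only [pvLoopI, h i (List.mem_cons_self)]
    exact ih (fun i' hi' => h i' (List.mem_cons_of_mem _ hi'))

-- ===== VERDICT (by name: the statement is the Claim_ definition above) =====
theorem ProductSmallestPair_spec : Claim_equal_ProductSmallestPair := by
  unfold Claim_equal_ProductSmallestPair
  intro sum arr _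
  unfold Spec_ProductSmallestPair
  match arr with
  | [] => rfl
  | [x] => rfl
  | x0 :: x1 :: rest =>
    obtain ⟨u, hs⟩ := sorted_eq_scan x0 x1 rest
    set a := (if x1 < x0 then (x1, x0) else (x0, x1)).1 with ha
    set b := (if x1 < x0 then (x1, x0) else (x0, x1)).2 with hb
    set p := (pvScan a b rest).1 with hp
    set q := (pvScan a b rest).2 with hq
    set s := PySem.List.sorted (x0 :: x1 :: rest) (fun x => x) false with hsdef
    set N : Int := ((x0 :: x1 :: rest).length : Int) with hN
    have hN2 : N = (rest.length : Int) + 2 := by rw [hN]; simp; omega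
    have hsl : (s.length : Int) = N := by
      rw [hsdef, PySem.List.length_sorted, hN]
    have hcond : ((N == 0) || decide (N < 2)) = false := by
      simp; omega
    unfold ProductSmallestPair ProductSmallestPair_alt
    simp only [← ha, ← hb, ← hp, ← hq, ← hsdef, ← hN, hcond, Bool.false_eq_true, if_false]
    by_cases hle : p + q ≤ sum
    · -- the very first pair (i = 0, j = 1) succeeds in A
      have hJ : pvLoopJ sum s 0 (PySem.List.pyRange (0 + 1) N 1) = some (p * q) := by
        rw [PySem.List.pyRange_one_cons (by omega)]
        have h0 : PySem.List.pyGetD s 0 0 = p := by rw [hs]; exact PySem.List.pyGetD_zero_cons p (q :: u) 0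
        have h1 : PySem.List.pyGetD s (0 + 1) 0 = q := by
          rw [hs]
          norm_num [PySem.List.pyGetD, PySem.List.pyIdx?, PySem.List.pyGet?]
        simp only [pvLoopJ, h0, h1, if_pos hle]
      have hI : pvLoopI sum s N (PySem.List.pyRange 0 (N - 1) 1) = some (p * q) := by
        rw [PySem.List.pyRange_one_cons (by omega)]
        simp only [pvLoopI, hJ]
      rw [hI, if_pos hle]
    · -- no pair can succeed: every s[i] + s[j] ≥ p + q > sum
      have hfail : ∀ i ∈ PySem.List.pyRange 0 (N - 1) 1,
          pvLoopJ sum s i (PySem.List.pyRange (i + 1) N 1) = none := by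
        intro i hi
        have hi' := (PySem.List.mem_pyRange_one).mp hi
        apply pvLoopJ_none
        intro j hj
        have hj' := (PySem.List.mem_pyRange_one).mp hj
        rw [PySem.List.pyGetD_eq_getElem s 0 (by omega) (by omega),
            PySem.List.pyGetD_eq_getElem s 0 (by omega) (by omega)]
        have hiN : i.toNat < s.length := by omega
        have hjN : j.toNat < s.length := by omega
        have hpi : s[(0 : Nat)]'(by omega) ≤ s[i.toNat]'hiN :=
          PySem.List.sorted_id_getElem_mono (x0 :: x1 :: rest) (by omega) (by rw [← hsdef]; exact hiN)
        have hqj : s[(1 : Nat)]'(by omega) ≤ s[j.toNat]'hjN :=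
          PySem.List.sorted_id_getElem_mono (x0 :: x1 :: rest) (by omega) (by rw [← hsdef]; exact hjN)
        have hs0 : s[(0 : Nat)]'(by omega) = p := by simp [hs]
        have hs1 : s[(1 : Nat)]'(by omega) = q := by simp [hs]
        rw [hs0] at hpi; rw [hs1] at hqj
        omega
      rw [pvLoopI_none sum s _ _ hfail, if_neg hle]
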